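-- pv_equiv track=rewrite | github.com/CastroLuis94/TP2-Algo3 | generador_conexos_ej1.py | tamanio_arboles
-- ===== SOURCE A (Python) =====
-- def tamanio_arboles(numero_ciudades,cant_arboles):
--     res = []
--     while(numero_ciudades >= cant_arboles):
--         res.append(int(cant_arboles))
--         numero_ciudades -= cant_arboles
--     if numero_ciudades != 0:
--         res.append(numero_ciudades)
--     return res
-- ===== SOURCE B (Python) =====
-- def tamanio_arboles(numero_ciudades, cant_arboles):
--     if numero_ciudades < cant_arboles:
--         return [numero_ciudades] if numero_ciudades != 0 else []
--     q, r = divmod(numero_ciudades, cant_arboles)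
--     res = [cant_arboles] * q
--     if r != 0:
--         res.append(r)
--     return res
-- ===== Notes on version B (the rewrite author's own statement) =====
-- stated objective: simpler
-- what changed: Replaces the repeated-subtraction while loop with a single divmod: q full trees built by one list multiplication plus the remainder appended if nonzero.
import Mathlib
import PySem

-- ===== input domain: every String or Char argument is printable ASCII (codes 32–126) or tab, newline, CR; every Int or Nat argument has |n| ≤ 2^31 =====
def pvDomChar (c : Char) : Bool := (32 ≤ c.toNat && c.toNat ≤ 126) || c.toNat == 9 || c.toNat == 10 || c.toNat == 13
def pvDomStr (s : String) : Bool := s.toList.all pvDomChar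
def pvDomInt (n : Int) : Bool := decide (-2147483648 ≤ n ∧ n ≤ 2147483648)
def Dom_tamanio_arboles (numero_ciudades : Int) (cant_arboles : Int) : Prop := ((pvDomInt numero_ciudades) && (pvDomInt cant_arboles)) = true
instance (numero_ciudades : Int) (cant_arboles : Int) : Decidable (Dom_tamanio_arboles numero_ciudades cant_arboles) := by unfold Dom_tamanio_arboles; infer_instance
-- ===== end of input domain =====

-- B replaces A's repeated-subtraction loop by a single divmod and list replication (same return value on Pre_).

-- ===== PORT A =====
-- the while loop of A; the `0 < cant_arboles` conjunct only makes the recursion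
-- total (outside it the Python loop never terminates; Pre_ excludes those inputs)
def pvLoopA (numero_ciudades cant_arboles : Int) : List Int :=
  if _h : cant_arboles ≤ numero_ciudades ∧ 0 < cant_arboles then
    cant_arboles :: pvLoopA (numero_ciudades - cant_arboles) cant_arboles
  else if numero_ciudades ≠ 0 then [numero_ciudades] else []
termination_by numero_ciudades.toNat
decreasing_by omega

def tamanio_arboles (numero_ciudades : Int) (cant_arboles : Int) : List Int :=
  pvLoopA numero_ciudades cant_arboles

-- ===== PORT B =====
def tamanio_arboles_alt (numero_ciudades : Int) (cant_arboles : Int) : List Int :=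
  if numero_ciudades < cant_arboles then
    if numero_ciudades ≠ 0 then [numero_ciudades] else []
  else
    let q := PySem.Int.floordiv numero_ciudades cant_arboles
    let r := PySem.Int.mod numero_ciudades cant_arboles
    List.replicate q.toNat cant_arboles ++ (if r ≠ 0 then [r] else [])

-- ===== PRECONDITION & SPEC =====
-- Pre_ excludes exactly the inputs (cant_arboles ≤ 0 ≤ … with numero_ciudades ≥ cant_arboles)
-- on which A's while loop never terminates (it subtracts a non-positive value forever).
def Pre_tamanio_arboles (numero_ciudades : Int) (cant_arboles : Int) : Prop :=
  0 < cant_arboles ∨ numero_ciudades < cant_arboles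
instance (numero_ciudades : Int) (cant_arboles : Int) : Decidable (Pre_tamanio_arboles numero_ciudades cant_arboles) := by unfold Pre_tamanio_arboles; infer_instance
def pvWitness_tamanio_arboles : Int × Int := (10, 3)

def Spec_tamanio_arboles (numero_ciudades : Int) (cant_arboles : Int) (out : List Int) : Prop := out = tamanio_arboles_alt numero_ciudades cant_arboles
instance (numero_ciudades : Int) (cant_arboles : Int) (out : List Int) : Decidable (Spec_tamanio_arboles numero_ciudades cant_arboles out) := by unfold Spec_tamanio_arboles; infer_instance

-- ===== CLAIM (what is proved, stated in full; the proofs are below) =====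
def Claim_equal_tamanio_arboles : Prop := ∀ (numero_ciudades : Int) (cant_arboles : Int), Dom_tamanio_arboles numero_ciudades cant_arboles → Pre_tamanio_arboles numero_ciudades cant_arboles → Spec_tamanio_arboles numero_ciudades cant_arboles (tamanio_arboles numero_ciudades cant_arboles)

-- ===== LEMMAS AND PROOFS =====

-- B unfolds one step of the division in the "loop runs" case
lemma alt_step (nc ca : Int) (h1 : ca ≤ nc) (h2 : 0 < ca) :
    tamanio_arboles_alt nc ca = ca :: tamanio_arboles_alt (nc - ca) ca := by
  have hfd : PySem.Int.floordiv nc ca = nc / ca := PySem.Int.floordiv_eq_ediv_of_pos h2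
  have hfd' : PySem.Int.floordiv (nc - ca) ca = (nc - ca) / ca :=
    PySem.Int.floordiv_eq_ediv_of_pos h2
  have hmd : PySem.Int.mod nc ca = nc % ca := PySem.Int.mod_eq_emod_of_pos h2
  have hmd' : PySem.Int.mod (nc - ca) ca = (nc - ca) % ca := PySem.Int.mod_eq_emod_of_pos h2
  have hq1 : 1 ≤ nc / ca := by
    rw [Int.le_ediv_iff_mul_le h2]; omega
  have hdivsub : (nc - ca) / ca = nc / ca - 1 := by
    have := Int.add_mul_ediv_right nc (-1) (by omega : ca ≠ 0)
    have e : nc + (-1) * ca = nc - ca := by ring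
    rw [e] at this; omega
  have hmodsub : (nc - ca) % ca = nc % ca := by
    conv_rhs => rw [show nc = (nc - ca) + 1 * ca by ring]
    rw [Int.add_mul_emod_self_right]
  by_cases hlt : nc - ca < ca
  · -- inner call takes the base branch; q = 1, r = nc - ca
    have hq : nc / ca = 1 := by
      have h2' : nc / ca < 2 := by
        rw [Int.ediv_lt_iff_lt_mul h2]; omega
      omega
    have hr : nc % ca = nc - ca := by
      have hx : nc % ca = (nc - ca) % ca := hmodsub.symm
      have hnn : 0 ≤ nc - ca := by omega
      rw [hx, Int.emod_eq_of_lt hnn hlt]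
    simp only [tamanio_arboles_alt, hfd, hmd, if_neg (by omega : ¬ nc < ca), if_pos hlt,
      hq, hr]
    norm_num
  · -- inner call recurses too
    have hq2 : 2 ≤ nc / ca := by
      rw [Int.le_ediv_iff_mul_le h2]; omega
    simp only [tamanio_arboles_alt, hfd, hmd, hfd', hmd', if_neg (by omega : ¬ nc < ca),
      if_neg (by omega : ¬ nc - ca < ca), hdivsub, hmodsub]
    have htn : (nc / ca).toNat = ((nc / ca - 1).toNat) + 1 := by omega
    rw [htn, List.replicate_succ]
    simp

lemma loopA_eq_alt (nc ca : Int) (hca : Pre_tamanio_arboles nc ca) :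
    pvLoopA nc ca = tamanio_arboles_alt nc ca := by
  by_cases hrun : ca ≤ nc ∧ 0 < ca
  · rw [pvLoopA, dif_pos hrun, alt_step nc ca hrun.1 hrun.2]
    have : pvLoopA (nc - ca) ca = tamanio_arboles_alt (nc - ca) ca :=
      loopA_eq_alt (nc - ca) ca (Or.inl hrun.2)
    rw [this]
  · rw [pvLoopA, dif_neg hrun]
    have hlt : nc < ca := by
      rcases hca with h | h
      · by_contra hge; exact hrun ⟨by omega, h⟩
      · exact h
    simp only [tamanio_arboles_alt, if_pos hlt]
termination_by nc.toNat
decreasing_by omega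

-- ===== VERDICT (by name: the statement is the Claim_ definition above) =====
theorem tamanio_arboles_spec : Claim_equal_tamanio_arboles := by
  intro nc ca _ hpre
  unfold Spec_tamanio_arboles tamanio_arboles
  exact loopA_eq_alt nc ca hpre
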